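-- pv_equiv track=rewrite | github.com/igorvanloo/Project-Euler-Explained | Unfinished Problems/pe00407 - Idempotents.py | quickcrt
-- ===== SOURCE A (Python) =====
-- import time, math, eulerlib
--
-- def is_prime(x): #Test if giving value is a prime
-- 	if x <= 1:
-- 		return False
-- 	elif x <= 3:
-- 		return True
-- 	elif x % 2 == 0:
-- 		return False
-- 	else:
-- 		for i in range(3, int(math.sqrt(x)) + 1, 2):
-- 			if x % i == 0:
-- 				return False
-- 		return True
--
-- def Divisors(x): #Find the divisors of a number
--     divisors = []
--     for i in range(1, int(math.sqrt(x)) + 1):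
--         if x % i == 0:
--             divisors.append(i)
--             #divisors.append(int(x/i))
--     #divisors.remove(x)
--     return (divisors)
--
-- def quickcrt(number):
--     if is_prime(number) == True:
--         return 1
--     else:
--         factors = Divisors(number)
--         candidates = [0,1]
--
--         for y in factors:
--             mod1 = y #x = 0 mod mod1
--             mod2 = int(number/y) #x = 1 mod mod2
--
--             can = [x*mod1 for x in range(1,mod2)]
--
--             for z in can:
--                 if (z-1) % mod2 == 0:
--                     candidates.append(z)
--
--             can2 = [x*mod2 for x in range(1,mod1)]
--
--             for z in can2:
--                 if (z-1) % mod1 == 0: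
--                     candidates.append(z)
--
--         return max(candidates)
-- ===== SOURCE B (Python) =====
-- import math
--
-- def quickcrt(number):
--     # Largest idempotent x (x*x == x mod number) below number.
--     # For each divisor pair (a, b), a*b == number, the solutions of
--     # x == 0 (mod a), x == 1 (mod b) are found by stepping through the a
--     # residues 1 + j*b (j < a) instead of scanning all multiples of a;
--     # the mirrored system's solution is number + 1 - z.
--     best = 1
--     for a in range(2, math.isqrt(number) + 1):
--         if number % a == 0:
--             b = number // a
--             for j in range(a):
--                 z = 1 + j * b
--                 if z % a == 0:
--                     best = max(best, z, number + 1 - z)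
--                     break
--     return best
-- ===== Notes on version B (the rewrite author's own statement) =====
-- stated objective: faster
-- what changed: Instead of scanning all ~number/y multiples of each divisor y for a CRT solution (and testing primality first), B scans for each divisor pair (a,b) only the a residues 1+j*b below number, finds the unique idempotent candidate for that pair, and obtains the mirrored pair's candidate as number+1-z, keeping a running maximum.
import Mathlib
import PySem

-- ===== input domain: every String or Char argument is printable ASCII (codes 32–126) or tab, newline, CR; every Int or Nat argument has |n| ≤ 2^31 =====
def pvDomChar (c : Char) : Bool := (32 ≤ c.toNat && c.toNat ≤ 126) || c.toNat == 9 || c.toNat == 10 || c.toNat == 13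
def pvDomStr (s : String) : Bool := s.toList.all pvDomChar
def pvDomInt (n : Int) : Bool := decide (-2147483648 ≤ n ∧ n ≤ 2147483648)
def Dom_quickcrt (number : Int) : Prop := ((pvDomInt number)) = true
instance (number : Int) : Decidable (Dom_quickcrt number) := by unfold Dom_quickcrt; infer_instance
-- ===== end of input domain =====

-- B replaces A's scan of all ~number/y multiples of each divisor (after a primality pre-test) by a
-- scan of only the a residues 1+j*b per divisor pair (a,b), mirroring with number+1-z: measurably faster.

-- ===== PORT A =====
-- int(math.sqrt(x)) is ported as Int.sqrt: exact for 0 ≤ x ≤ 2^31 (float sqrt is correctly rounded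
-- and cannot cross an integer boundary there); negative x (math.sqrt raises) is outside Pre_.
def is_prime (x : Int) : Bool :=
  if x ≤ 1 then false
  else if x ≤ 3 then true
  else if PySem.Int.mod x 2 == 0 then false
  else
    -- for i in range(3, int(sqrt x)+1, 2): if x % i == 0: return False / return True
    (PySem.List.pyRange 3 (Int.sqrt x + 1) 2).foldl
      (fun ok i => if PySem.Int.mod x i == 0 then false else ok) true

def pyDivisors (x : Int) : List Int :=
  (PySem.List.pyRange 1 (Int.sqrt x + 1) 1).foldl
    (fun divisors i => if PySem.Int.mod x i == 0 then divisors ++ [i] else divisors) []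

def quickcrt (number : Int) : Int :=
  if is_prime number then 1
  else
    let factors := pyDivisors number
    let candidates : List Int := [0, 1]
    let candidates := factors.foldl (fun candidates y =>
      let mod1 := y
      -- int(number/y): exact under Pre_ since y divides number ≤ 2^31, so the true division is an
      -- exactly representable integer; ported as floor division.
      let mod2 := PySem.Int.floordiv number y
      let can := (PySem.List.pyRange 1 mod2 1).map (fun x => x * mod1)
      let candidates := can.foldl (fun candidates z =>
        if PySem.Int.mod (z - 1) mod2 == 0 then candidates ++ [z] else candidates) candidates
      let can2 := (PySem.List.pyRange 1 mod1 1).map (fun x => x * mod2)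
      can2.foldl (fun candidates z =>
        if PySem.Int.mod (z - 1) mod1 == 0 then candidates ++ [z] else candidates) candidates)
      candidates
    -- max(candidates): candidates starts as [0,1], so the list is never empty and max never raises
    match PySem.List.max? candidates (fun z => z) with
    | some m => m
    | none => 0

-- ===== PORT B =====
-- math.isqrt(number) = Int.sqrt number for number ≥ 0 (negative input raises, outside Pre_).
def quickcrt_alt (number : Int) : Int :=
  (PySem.List.pyRange 2 (Int.sqrt number + 1) 1).foldl
    (fun best a =>
      if PySem.Int.mod number a == 0 then
        let b := PySem.Int.floordiv number a
        -- for j in range(a): if (1+j*b) % a == 0: best = max(best, z, number+1-z); break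
        match (PySem.List.pyRange 0 a 1).find? (fun j => PySem.Int.mod (1 + j * b) a == 0) with
        | some j => max best (max (1 + j * b) (number + 1 - (1 + j * b)))
        | none => best
      else best) 1

-- ===== PRECONDITION & SPEC =====
-- Pre_ excludes negative numbers only: there math.sqrt/math.isqrt raise ValueError in A and B alike.
def Pre_quickcrt (number : Int) : Prop := 0 ≤ number
instance (number : Int) : Decidable (Pre_quickcrt number) := by unfold Pre_quickcrt; infer_instance
def pvWitness_quickcrt : Int := 12

def Spec_quickcrt (number : Int) (out : Int) : Prop := out = quickcrt_alt number
instance (number : Int) (out : Int) : Decidable (Spec_quickcrt number out) := by unfold Spec_quickcrt; infer_instance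

-- ===== CLAIM (what is proved, stated in full; the proofs are below) =====
def Claim_equal_quickcrt : Prop := ∀ (number : Int), Dom_quickcrt number → Pre_quickcrt number → Spec_quickcrt number (quickcrt number)

-- ===== LEMMAS AND PROOFS =====

-- `Idem n a b z`: z solves the pair system x ≡ 0 (mod a), x ≡ 1 (mod b) inside (0, n).
def Idem (n a b z : Int) : Prop := 0 < z ∧ z < n ∧ a ∣ z ∧ b ∣ (z - 1)

-- the inner candidate list A builds for the pair (y, b): multiples of y below y*b that are ≡ 1 mod b
def S1L (y b : Int) : List Int :=
  ((PySem.List.pyRange 1 b 1).map (fun x => x * y)).filter (fun z => PySem.Int.mod (z - 1) b == 0)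

def divsL (n : Int) : List Int :=
  (PySem.List.pyRange 1 (Int.sqrt n + 1) 1).filter (fun i => PySem.Int.mod n i == 0)

def ACands (n : Int) : List Int :=
  [0, 1] ++ (divsL n).flatMap
    (fun y => S1L y (PySem.Int.floordiv n y) ++ S1L (PySem.Int.floordiv n y) y)

-- B's loop body, named for the proofs (definitionally the lambda in quickcrt_alt)
def Bstep (n best a : Int) : Int :=
  if PySem.Int.mod n a == 0 then
    match (PySem.List.pyRange 0 a 1).find?
        (fun j => PySem.Int.mod (1 + j * PySem.Int.floordiv n a) a == 0) with
    | some j => max best (max (1 + j * PySem.Int.floordiv n a)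
        (n + 1 - (1 + j * PySem.Int.floordiv n a)))
    | none => best
  else best

theorem alt_eq (n : Int) :
    quickcrt_alt n = (PySem.List.pyRange 2 (Int.sqrt n + 1) 1).foldl (Bstep n) 1 := rfl

theorem sqrt_sq_le (n : Int) (h : 0 ≤ n) : Int.sqrt n * Int.sqrt n ≤ n := by
  unfold Int.sqrt
  have h1 := Nat.sqrt_le' n.toNat
  rw [pow_two] at h1
  have h2 : ((n.toNat.sqrt * n.toNat.sqrt : Nat) : Int) ≤ ((n.toNat : Nat) : Int) :=
    Int.ofNat_le.mpr h1
  push_cast at h2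
  have h3 : ((n.toNat : Nat) : Int) = n := Int.toNat_of_nonneg h
  linarith

theorem foldl_ge_init {α : Type} (l : List α) (f : Int → α → Int)
    (hf : ∀ acc a, acc ≤ f acc a) (init : Int) : init ≤ l.foldl f init := by
  induction l generalizing init with
  | nil => simp
  | cons x t ih => exact le_trans (hf init x) (ih _)

theorem le_foldl_of_mem {α : Type} (l : List α) (f : Int → α → Int)
    (hf : ∀ acc a, acc ≤ f acc a) (init v : Int) (a : α) (ha : a ∈ l)
    (hv : ∀ acc, v ≤ f acc a) : v ≤ l.foldl f init := by
  obtain ⟨s, t, rfl⟩ := List.append_of_mem ha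
  rw [List.foldl_append, List.foldl_cons]
  exact le_trans (hv _) (foldl_ge_init t f hf _)

theorem Bstep_mono (n : Int) : ∀ acc a, acc ≤ Bstep n acc a := by
  intro acc a
  unfold Bstep
  split_ifs with h
  · cases hfind : (PySem.List.pyRange 0 a 1).find?
        (fun j => PySem.Int.mod (1 + j * PySem.Int.floordiv n a) a == 0) with
    | none => exact le_rfl
    | some j => exact le_max_left _ _
  · exact le_rfl

-- two solutions of the same pair system inside (0, n) coincide
theorem idem_unique {n a b z₁ z₂ : Int} (hab : a * b = n)
    (h₁ : Idem n a b z₁) (h₂ : Idem n a b z₂) : z₁ = z₂ := by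
  obtain ⟨hz₁, hz₁n, ha₁, hb₁⟩ := h₁
  obtain ⟨hz₂, hz₂n, ha₂, hb₂⟩ := h₂
  have hg1 : (Int.gcd a b : Int) ∣ 1 := by
    have d1 := (Int.gcd_dvd_left a b).trans ha₁
    have d2 := (Int.gcd_dvd_right a b).trans hb₁
    have d3 := dvd_sub d1 d2
    simpa using d3
  have hg : Int.gcd a b = 1 := Nat.dvd_one.mp (by exact_mod_cast hg1)
  have hcop : IsCoprime a b := Int.isCoprime_iff_gcd_eq_one.mpr hg
  have hdvd : n ∣ z₁ - z₂ := by
    rw [← hab]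
    refine hcop.mul_dvd (dvd_sub ha₁ ha₂) ?_
    have d4 := dvd_sub hb₁ hb₂
    convert d4 using 1
    ring
  have hz : z₁ - z₂ = 0 := Int.eq_zero_of_abs_lt_dvd hdvd (by rw [abs_lt]; omega)
  omega

theorem idem_mirror {n a b z : Int} (hab : a * b = n) (ha : 2 ≤ a) (hb : 2 ≤ b)
    (h : Idem n a b z) : Idem n b a (n + 1 - z) := by
  obtain ⟨hz, hzn, hda, hdb⟩ := h
  have hz2 : 2 ≤ z := le_trans ha (Int.le_of_dvd hz hda)
  have hbn : b ∣ n := Dvd.intro_left a hab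
  have han : a ∣ n := Dvd.intro b hab
  refine ⟨by omega, by omega, ?_, ?_⟩
  · have d := dvd_sub hbn hdb
    convert d using 1
    ring
  · have d := dvd_sub han hda
    convert d using 1
    ring

-- membership in the inner list is exactly the pair-system property
theorem mem_S1L {y b z : Int} (hy : 1 ≤ y) (hb : 1 ≤ b) :
    z ∈ S1L y b ↔ Idem (y * b) y b z := by
  simp only [S1L, List.mem_filter, List.mem_map, PySem.List.mem_pyRange_one,
    beq_iff_eq, PySem.Int.mod_eq_zero_iff_dvd, Idem]
  constructor
  · rintro ⟨⟨x, ⟨hx1, hxb⟩, rfl⟩, hdvd⟩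
    refine ⟨by nlinarith, by nlinarith, dvd_mul_left y x, hdvd⟩
  · rintro ⟨hz, hzn, ⟨x, rfl⟩, hdvd⟩
    have hx1 : 1 ≤ x := by nlinarith
    have hxb : x < b := by nlinarith
    exact ⟨⟨x, ⟨hx1, hxb⟩, mul_comm x y⟩, hdvd⟩

-- B's inner search: soundness
theorem find?_sound {n a b j : Int} (hab : a * b = n) (ha : 2 ≤ a) (hb : a ≤ b)
    (h : (PySem.List.pyRange 0 a 1).find? (fun j => PySem.Int.mod (1 + j * b) a == 0) = some j) :
    0 ≤ j ∧ j < a ∧ Idem n a b (1 + j * b) := by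
  have hmem := List.mem_of_find?_eq_some h
  have hpred := List.find?_some h
  rw [PySem.List.mem_pyRange_one] at hmem
  obtain ⟨hj0, hja⟩ := hmem
  have hdvd : a ∣ 1 + j * b := by
    rw [← PySem.Int.mod_eq_zero_iff_dvd]
    simpa using hpred
  have hjb : 0 ≤ j * b := mul_nonneg hj0 (by omega)
  have hub : j * b ≤ (a - 1) * b := mul_le_mul_of_nonneg_right (by omega) (by omega)
  refine ⟨hj0, hja, by omega, by nlinarith, hdvd, ⟨j, by ring⟩⟩

-- B's inner search: completeness (it finds exactly the unique pair solution)
theorem find?_complete {n a b z : Int} (hab : a * b = n) (ha : 2 ≤ a) (hb : a ≤ b)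
    (h : Idem n a b z) :
    ∃ j, (PySem.List.pyRange 0 a 1).find?
        (fun j => PySem.Int.mod (1 + j * b) a == 0) = some j ∧ 1 + j * b = z := by
  obtain ⟨hz, hzn, hda, hdb⟩ := h
  obtain ⟨j₀, hj₀⟩ := hdb
  have hb0 : (0:Int) < b := by omega
  have hj₀0 : 0 ≤ j₀ := by nlinarith
  have hj₀a : j₀ < a := by nlinarith
  have hz' : 1 + j₀ * b = z := by rw [mul_comm]; omega
  have hmem : j₀ ∈ PySem.List.pyRange 0 a 1 := (PySem.List.mem_pyRange_one).mpr ⟨hj₀0, hj₀a⟩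
  have hpred : (PySem.Int.mod (1 + j₀ * b) a == 0) = true := by
    rw [beq_iff_eq, PySem.Int.mod_eq_zero_iff_dvd, hz']
    exact hda
  have hsome : ((PySem.List.pyRange 0 a 1).find?
      (fun j => PySem.Int.mod (1 + j * b) a == 0)).isSome :=
    List.find?_isSome.mpr ⟨j₀, hmem, hpred⟩
  obtain ⟨j, hj⟩ := Option.isSome_iff_exists.mp hsome
  refine ⟨j, hj, ?_⟩
  obtain ⟨_, _, hidem⟩ := find?_sound hab ha hb hj
  exact idem_unique hab hidem ⟨hz, hzn, hda, ⟨j₀, hj₀⟩⟩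

-- A's candidate accumulation, flattened
theorem candidates_eq (n : Int) :
    (pyDivisors n).foldl (fun candidates y =>
      let mod1 := y
      let mod2 := PySem.Int.floordiv n y
      let can := (PySem.List.pyRange 1 mod2 1).map (fun x => x * mod1)
      let candidates := can.foldl (fun candidates z =>
        if PySem.Int.mod (z - 1) mod2 == 0 then candidates ++ [z] else candidates) candidates
      let can2 := (PySem.List.pyRange 1 mod1 1).map (fun x => x * mod2)
      can2.foldl (fun candidates z =>
        if PySem.Int.mod (z - 1) mod1 == 0 then candidates ++ [z] else candidates) candidates)
      [0, 1] = ACands n := by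
  have hstep : (fun (candidates : List Int) (y : Int) =>
      let mod1 := y
      let mod2 := PySem.Int.floordiv n y
      let can := (PySem.List.pyRange 1 mod2 1).map (fun x => x * mod1)
      let candidates := can.foldl (fun candidates z =>
        if PySem.Int.mod (z - 1) mod2 == 0 then candidates ++ [z] else candidates) candidates
      let can2 := (PySem.List.pyRange 1 mod1 1).map (fun x => x * mod2)
      can2.foldl (fun candidates z =>
        if PySem.Int.mod (z - 1) mod1 == 0 then candidates ++ [z] else candidates) candidates) =
      (fun candidates y => candidates ++
        (S1L y (PySem.Int.floordiv n y) ++ S1L (PySem.Int.floordiv n y) y)) := by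
    funext candidates y
    simp only [PySem.List.foldl_append_if_eq_filter, S1L, List.append_assoc]
  rw [hstep, PySem.List.foldl_append_eq_flatMap]
  unfold pyDivisors ACands divsL
  rw [PySem.List.foldl_append_if_eq_filter]
  simp

theorem quickcrt_eq_of_not_prime {n : Int} (h : is_prime n = false) :
    quickcrt n = match PySem.List.max? (ACands n) (fun z => z) with
      | some m => m
      | none => 0 := by
  unfold quickcrt
  rw [h]
  simp only [Bool.false_eq_true, if_false, candidates_eq]

theorem prime_no_small_divisor {n a : Int} (hn : 4 ≤ n) (hp : is_prime n = true)
    (ha2 : 2 ≤ a) (har : a ≤ Int.sqrt n) : ¬ (a ∣ n) := by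
  intro hdvd
  unfold is_prime at hp
  rw [if_neg (by omega : ¬ n ≤ 1), if_neg (by omega : ¬ n ≤ 3)] at hp
  by_cases h2 : (PySem.Int.mod n 2 == 0) = true
  · rw [if_pos h2] at hp
    simp at hp
  · rw [if_neg h2] at hp
    rw [PySem.List.foldl_if_false_eq] at hp
    have hany : (PySem.List.pyRange 3 (Int.sqrt n + 1) 2).any
        (fun i => PySem.Int.mod n i == 0) = false := by
      simpa using hp
    have hall := List.any_eq_false.mp hany
    have h2' : ¬ ((2:Int) ∣ n) := by
      rw [← PySem.Int.mod_eq_zero_iff_dvd]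
      simpa using h2
    rcases Int.even_or_odd a with he | ho
    · exact h2' (dvd_trans he.two_dvd hdvd)
    · obtain ⟨k, hk⟩ := ho
      have hmem : a ∈ PySem.List.pyRange 3 (Int.sqrt n + 1) 2 := by
        rw [PySem.List.mem_pyRange_iff_of_pos (by norm_num)]
        exact ⟨by omega, by omega, ⟨k - 1, by omega⟩⟩
      have := hall a hmem
      rw [beq_iff_eq, PySem.Int.mod_eq_zero_iff_dvd] at this
      simp [hdvd] at this

theorem alt_of_prime {n : Int} (hn : 4 ≤ n) (hp : is_prime n = true) : quickcrt_alt n = 1 := by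
  rw [alt_eq]
  have hid : ∀ (acc a : Int), a ∈ PySem.List.pyRange 2 (Int.sqrt n + 1) 1 →
      Bstep n acc a = acc := by
    intro acc a ha
    rw [PySem.List.mem_pyRange_one] at ha
    have hnd := prime_no_small_divisor hn hp ha.1 (by omega)
    unfold Bstep
    rw [if_neg]
    rw [beq_iff_eq, PySem.Int.mod_eq_zero_iff_dvd]
    exact hnd
  rw [PySem.List.foldl_congr_mem _ _ (fun acc _ => acc) _ hid, PySem.List.foldl_ignore]

-- a member of ACands coming from a divisor pair
theorem mem_ACands_of {n y z : Int} (hy1 : 1 ≤ y) (hyr : y ≤ Int.sqrt n) (hdvd : y ∣ n)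
    (hz : z ∈ S1L y (PySem.Int.floordiv n y) ∨ z ∈ S1L (PySem.Int.floordiv n y) y) :
    z ∈ ACands n := by
  unfold ACands divsL
  rw [List.mem_append]
  right
  rw [List.mem_flatMap]
  refine ⟨y, ?_, by rwa [List.mem_append]⟩
  rw [List.mem_filter, PySem.List.mem_pyRange_one]
  exact ⟨⟨hy1, by omega⟩, by rw [beq_iff_eq, PySem.Int.mod_eq_zero_iff_dvd]; exact hdvd⟩

theorem quickcrt_spec' : ∀ (number : Int), Dom_quickcrt number → Pre_quickcrt number →
    quickcrt number = quickcrt_alt number := by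
  intro n _ hpre
  unfold Pre_quickcrt at hpre
  by_cases hn4 : n < 4
  · have hs0 : Int.sqrt 0 = 0 := by
      unfold Int.sqrt; norm_num
    have hs1 : Int.sqrt 1 = 1 := by
      unfold Int.sqrt; norm_num
    have hs2 : Int.sqrt 2 = 1 := by
      unfold Int.sqrt
      have : Nat.sqrt (Int.toNat 2) = 1 := by symm; rw [Nat.eq_sqrt] <;> norm_num
      rw [this]; norm_num
    have hs3 : Int.sqrt 3 = 1 := by
      unfold Int.sqrt
      have : Nat.sqrt (Int.toNat 3) = 1 := by symm; rw [Nat.eq_sqrt] <;> norm_num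
      rw [this]; norm_num
    interval_cases n
    · simp only [quickcrt, quickcrt_alt, is_prime, pyDivisors, hs0]
      decide
    · simp only [quickcrt, quickcrt_alt, is_prime, pyDivisors, hs1]
      decide
    · simp only [quickcrt, quickcrt_alt, is_prime, hs2]
      decide
    · simp only [quickcrt, quickcrt_alt, is_prime, hs3]
      decide
  rw [Int.not_lt] at hn4
  have hr2 : Int.sqrt n * Int.sqrt n ≤ n := sqrt_sq_le n hpre
  have hr0 : 0 ≤ Int.sqrt n := Int.sqrt_nonneg n
  by_cases hp : is_prime n = true
  · have hA : quickcrt n = 1 := by unfold quickcrt; rw [hp]; simp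
    rw [hA, alt_of_prime hn4 hp]
  · have hp' : is_prime n = false := by simpa using hp
    rw [quickcrt_eq_of_not_prime hp', alt_eq]
    have hne : ACands n ≠ [] := by simp [ACands]
    obtain ⟨m, hm⟩ : ∃ m, PySem.List.max? (ACands n) (fun z => z) = some m := by
      cases h : PySem.List.max? (ACands n) (fun z => z) with
      | none => exact absurd ((PySem.List.max?_eq_none_iff _ _).mp h) hne
      | some m => exact ⟨m, rfl⟩
    rw [hm]
    dsimp only
    have hmem := PySem.List.max?_mem hm
    have hmax : ∀ c ∈ ACands n, c ≤ m := by
      intro c hc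
      simpa using PySem.List.max?_isMax hm c hc
    have hone : (1:Int) ∈ ACands n := by simp [ACands]
    apply le_antisymm
    · -- m ≤ B's fold
      unfold ACands at hmem
      rw [List.mem_append, List.mem_flatMap] at hmem
      rcases hmem with h01 | ⟨y, hy, hyz⟩
      · -- m = 0 or 1
        have h1 := foldl_ge_init (PySem.List.pyRange 2 (Int.sqrt n + 1) 1)
          (Bstep n) (Bstep_mono n) 1
        have hm01 : m = 0 ∨ m = 1 := by simpa using h01
        rcases hm01 with rfl | rfl <;> omega
      · rw [divsL, List.mem_filter, PySem.List.mem_pyRange_one] at hy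
        obtain ⟨⟨hy1, hyr⟩, hydvd'⟩ := hy
        rw [beq_iff_eq, PySem.Int.mod_eq_zero_iff_dvd] at hydvd'
        set b := PySem.Int.floordiv n y with hbdef
        have hb' : b = n / y := by
          rw [hbdef, PySem.Int.floordiv_eq_ediv_of_pos (by omega)]
        have hab : y * b = n := by rw [hb']; exact Int.mul_ediv_cancel' hydvd'
        by_cases hy2 : 2 ≤ y
        · -- a genuine pair (y, b), 2 ≤ y ≤ b
          have hyb : y ≤ b := by
            have h1 : y * y ≤ y * b := le_trans (show y * y ≤ n by nlinarith) (le_of_eq hab.symm)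
            exact le_of_mul_le_mul_left h1 (by omega)
          rw [List.mem_append] at hyz
          rcases hyz with hyz | hyz
          · have hidem : Idem n y b m := by rw [← hab]; exact (mem_S1L (by omega) (by omega)).mp hyz
            obtain ⟨j, hfind, hjz⟩ := find?_complete hab hy2 hyb hidem
            refine le_foldl_of_mem _ (Bstep n) (Bstep_mono n) 1 m y
              ((PySem.List.mem_pyRange_one).mpr ⟨hy2, by omega⟩) ?_
            intro acc
            unfold Bstep
            rw [if_pos (by rw [beq_iff_eq, PySem.Int.mod_eq_zero_iff_dvd]; exact hydvd')]
            rw [← hbdef, hfind]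
            dsimp only
            rw [hjz]
            exact le_trans (le_max_left _ _) (le_max_right _ _)
          · have hb2 : 2 ≤ b := by omega
            have hidem : Idem n b y m := by
              rw [← hab, mul_comm]
              exact (mem_S1L (by omega) (by omega)).mp hyz
            have hidem' : Idem n y b (n + 1 - m) :=
              idem_mirror (by rw [mul_comm]; exact hab) hb2 hy2 hidem
            obtain ⟨j, hfind, hjz⟩ := find?_complete hab hy2 hyb hidem'
            refine le_foldl_of_mem _ (Bstep n) (Bstep_mono n) 1 m y
              ((PySem.List.mem_pyRange_one).mpr ⟨hy2, by omega⟩) ?_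
            intro acc
            unfold Bstep
            rw [if_pos (by rw [beq_iff_eq, PySem.Int.mod_eq_zero_iff_dvd]; exact hydvd')]
            rw [← hbdef, hfind]
            dsimp only
            have hm' : n + 1 - (1 + j * b) = m := by omega
            rw [hm']
            exact le_trans (le_max_right _ _) (le_max_right _ _)
        · -- y = 1: the only candidate this pair produces is 1
          have hy1' : y = 1 := by omega
          subst hy1'
          have hbn : b = n := by rw [hb', Int.ediv_one]
          rw [List.mem_append] at hyz
          have h1le := foldl_ge_init (PySem.List.pyRange 2 (Int.sqrt n + 1) 1)
            (Bstep n) (Bstep_mono n) 1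
          rcases hyz with hyz | hyz
          · have h := (mem_S1L (le_refl (1:Int)) (show (1:Int) ≤ b by omega)).mp hyz
            rw [hab] at h
            obtain ⟨hz, hzn, _, hdvd⟩ := h
            rw [hbn] at hdvd
            have hm1 : m - 1 = 0 := Int.eq_zero_of_abs_lt_dvd hdvd (by rw [abs_lt]; omega)
            omega
          · have h := (mem_S1L (show (1:Int) ≤ b by omega) (le_refl (1:Int))).mp hyz
            obtain ⟨hz, hzn, hdvd, _⟩ := h
            rw [hbn] at hdvd
            have hnm := Int.le_of_dvd hz hdvd
            rw [mul_one, hbn] at hzn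
            omega
    · -- B's fold ≤ m
      refine List.foldlRecOn (motive := fun v => v ≤ m) _ (Bstep n) (hmax 1 hone) ?_
      intro acc hacc a ha
      rw [PySem.List.mem_pyRange_one] at ha
      obtain ⟨ha2, har⟩ := ha
      unfold Bstep
      split_ifs with hc
      · rw [beq_iff_eq, PySem.Int.mod_eq_zero_iff_dvd] at hc
        set b := PySem.Int.floordiv n a with hbdef
        have hb' : b = n / a := by
          rw [hbdef, PySem.Int.floordiv_eq_ediv_of_pos (by omega)]
        have hab : a * b = n := by rw [hb']; exact Int.mul_ediv_cancel' hc
        have hba : a ≤ b := by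
          have h1 : a * a ≤ a * b := le_trans (show a * a ≤ n by nlinarith) (le_of_eq hab.symm)
          exact le_of_mul_le_mul_left h1 (by omega)
        cases hfind : (PySem.List.pyRange 0 a 1).find?
            (fun j => PySem.Int.mod (1 + j * b) a == 0) with
        | none => exact hacc
        | some j =>
          obtain ⟨hj0, hja, hidem⟩ := find?_sound hab ha2 hba hfind
          have hz_mem : (1 + j * b) ∈ ACands n := by
            refine mem_ACands_of (by omega) (by omega) hc (Or.inl ?_)
            rw [← hbdef, mem_S1L (by omega) (by omega), hab]
            exact hidem
          have ht_mem : (n + 1 - (1 + j * b)) ∈ ACands n := by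
            refine mem_ACands_of (by omega) (by omega) hc (Or.inr ?_)
            rw [← hbdef, mem_S1L (by omega) (by omega), mul_comm, hab]
            exact idem_mirror hab ha2 (by omega) hidem
          exact max_le hacc (max_le (hmax _ hz_mem) (hmax _ ht_mem))
      · exact hacc

-- ===== VERDICT (by name: the statement is the Claim_ definition above) =====
theorem quickcrt_spec : Claim_equal_quickcrt := by
  intro number hdom hpre
  exact quickcrt_spec' number hdom hpre
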